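-- pv_equiv track=rewrite | github.com/jake163/SCF-Guess-Project | mbe_density.py | make_nmers
-- ===== SOURCE A (Python) =====
-- import itertools
--
-- def make_nmers(mono2atom, mol, n):
--     nmers      = {}
--     n_monomers = len(mono2atom)
--     for nmer in itertools.combinations(range(n_monomers), n):
--         nmers[tuple(nmer)] = []
--         for mono in nmer:
--             for atom in mono2atom[mono]:
--                 nmers[(nmer)] += [mol[atom]]
--     return nmers
-- ===== SOURCE B (Python) =====
-- def make_nmers(mono2atom, mol, n):
--     m = len(mono2atom)
--
--     def rec(start, k):
--         # all k-combinations of range(start, m), each paired with its atom data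
--         if k == 0:
--             return [((), [])]
--         out = []
--         for i in range(start, m - k + 1):
--             data_i = [mol[atom] for atom in mono2atom[i]]
--             for tail, data in rec(i + 1, k - 1):
--                 out.append(((i,) + tail, data_i + data))
--         return out
--
--     return dict(rec(0, n))
-- ===== Notes on version B (the rewrite author's own statement) =====
-- stated objective: alternative
-- what changed: A iterates itertools.combinations and re-gathers every monomer's atom data separately for each combination while growing dict entries with +=; B generates the combinations itself by recursion on the starting index, pairing each combination with its atom data as it is built, so the data of a shared leading monomer is gathered once per branch and reused across all tails.
import Mathlib
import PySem

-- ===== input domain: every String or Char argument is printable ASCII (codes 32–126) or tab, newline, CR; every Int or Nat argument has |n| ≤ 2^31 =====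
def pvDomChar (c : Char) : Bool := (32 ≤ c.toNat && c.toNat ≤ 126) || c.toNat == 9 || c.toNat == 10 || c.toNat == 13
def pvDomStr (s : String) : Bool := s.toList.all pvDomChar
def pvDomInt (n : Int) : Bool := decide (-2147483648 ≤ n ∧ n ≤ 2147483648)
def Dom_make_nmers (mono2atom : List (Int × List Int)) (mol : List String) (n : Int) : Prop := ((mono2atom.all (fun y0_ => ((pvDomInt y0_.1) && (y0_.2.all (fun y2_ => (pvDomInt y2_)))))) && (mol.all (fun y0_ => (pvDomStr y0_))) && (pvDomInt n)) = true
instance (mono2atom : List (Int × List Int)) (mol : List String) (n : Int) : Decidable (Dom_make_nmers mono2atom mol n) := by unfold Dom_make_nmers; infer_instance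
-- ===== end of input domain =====

-- B replaces A's per-combination re-gathering (itertools + dict building with +=) by one
-- recursive generator that emits each combination already paired with its atom data,
-- sharing the per-monomer data of a common first element across all its tails (objective: alternative).

-- itertools.combinations(xs, k) in itertools' lexicographic order (shared library helper for both ports)
def combosInt : List Int → Nat → List (List Int)
  | _, 0 => [[]]
  | [], _ + 1 => []
  | x :: xs, k + 1 => ((combosInt xs k).map (x :: ·)) ++ combosInt xs (k + 1)

-- ===== PORT A =====
def make_nmers (mono2atom : List (Int × List Int)) (mol : List String) (n : Int) : List (List Int × List String) :=
  -- nmers = {}; for nmer in combinations(range(len(mono2atom)), n): nmers[nmer] = []; for mono in nmer: for atom in mono2atom[mono]: nmers[nmer] += [mol[atom]]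
  let n_monomers : Int := (mono2atom.length : Int)
  let nmers : PySem.Dict (List Int) (List String) :=
    (combosInt (PySem.List.pyRange 0 n_monomers 1) n.toNat).foldl
      (fun nmers nmer =>
        let nmers := nmers.insert nmer []
        nmer.foldl
          (fun nmers mono =>
            (PySem.Dict.getD (PySem.Dict.mk mono2atom) mono []).foldl
              (fun nmers atom =>
                nmers.modify nmer [] (fun v => v ++ [PySem.List.pyGetD mol atom ""]))
              nmers)
          nmers)
      PySem.Dict.empty
  nmers.items

-- ===== PORT B =====
-- rec(start, k): all k-combinations of range(start, m) paired with their gathered atom data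
def make_nmers_alt_rec (mono2atom : List (Int × List Int)) (mol : List String) (m : Int) :
    Int → Nat → List (List Int × List String)
  | _, 0 => [([], [])]
  | start, k + 1 =>
    (PySem.List.pyRange start (m - k) 1).foldl
      (fun out i =>
        let data_i := (PySem.Dict.getD (PySem.Dict.mk mono2atom) i []).map
          (fun atom => PySem.List.pyGetD mol atom "")
        out ++ (make_nmers_alt_rec mono2atom mol m (i + 1) k).map
          (fun td => (i :: td.1, data_i ++ td.2)))
      []

def make_nmers_alt (mono2atom : List (Int × List Int)) (mol : List String) (n : Int) : List (List Int × List String) :=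
  let m : Int := (mono2atom.length : Int)
  (PySem.Dict.ofList (make_nmers_alt_rec mono2atom mol m 0 n.toNat)).items

-- ===== PRECONDITION & SPEC =====
-- Pre_ excludes exactly the inputs where the Pythons raise: n < 0 (ValueError in
-- itertools.combinations), and — whenever some combination is actually produced and
-- non-empty, i.e. 1 ≤ n ≤ len(mono2atom) — a monomer key 0..m-1 missing from the dict
-- (KeyError) or an atom index out of range for mol (IndexError).
def Pre_make_nmers (mono2atom : List (Int × List Int)) (mol : List String) (n : Int) : Prop :=
  (decide (0 ≤ n) &&
    (decide (n = 0) || decide ((mono2atom.length : Int) < n) ||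
      (PySem.List.pyRange 0 (mono2atom.length : Int) 1).all (fun i =>
        match PySem.Dict.get? (PySem.Dict.mk mono2atom) i with
        | some atoms => atoms.all (fun a => decide (-(mol.length : Int) ≤ a ∧ a < (mol.length : Int)))
        | none => false))) = true
instance (mono2atom : List (Int × List Int)) (mol : List String) (n : Int) : Decidable (Pre_make_nmers mono2atom mol n) := by unfold Pre_make_nmers; infer_instance

def pvWitness_make_nmers : (List (Int × List Int)) × List String × Int :=
  ([(0, [0, 1]), (1, [1]), (2, [0])], ["H", "O"], 2)

def Spec_make_nmers (mono2atom : List (Int × List Int)) (mol : List String) (n : Int) (out : List (List Int × List String)) : Prop := out = make_nmers_alt mono2atom mol n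
instance (mono2atom : List (Int × List Int)) (mol : List String) (n : Int) (out : List (List Int × List String)) : Decidable (Spec_make_nmers mono2atom mol n out) := by unfold Spec_make_nmers; infer_instance

-- ===== CLAIM (what is proved, stated in full; the proofs are below) =====
def Claim_equal_make_nmers : Prop := ∀ (mono2atom : List (Int × List Int)) (mol : List String) (n : Int), Dom_make_nmers mono2atom mol n → Pre_make_nmers mono2atom mol n → Spec_make_nmers mono2atom mol n (make_nmers mono2atom mol n)

-- ===== LEMMAS AND PROOFS =====

-- members of a combination come from the source list
theorem combosInt_subset {xs : List Int} {k : Nat} {c : List Int} (hc : c ∈ combosInt xs k) :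
    ∀ x ∈ c, x ∈ xs := by
  induction xs generalizing k c with
  | nil =>
    cases k with
    | zero => simp [combosInt] at hc; simp [hc]
    | succ k => simp [combosInt] at hc
  | cons y ys ih =>
    cases k with
    | zero => simp [combosInt] at hc; simp [hc]
    | succ k =>
      simp only [combosInt, List.mem_append, List.mem_map] at hc
      rcases hc with ⟨c', hc', rfl⟩ | hc
      · intro x hx
        rcases List.mem_cons.1 hx with rfl | hx
        · exact List.mem_cons_self
        · exact List.mem_cons_of_mem _ (ih hc' x hx)
      · intro x hx; exact List.mem_cons_of_mem _ (ih hc x hx)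

theorem combosInt_nodup {xs : List Int} (hxs : xs.Nodup) (k : Nat) : (combosInt xs k).Nodup := by
  induction xs generalizing k with
  | nil => cases k <;> simp [combosInt]
  | cons y ys ih =>
    cases k with
    | zero => simp [combosInt]
    | succ k =>
      have hys : ys.Nodup := (List.nodup_cons.1 hxs).2
      have hy : y ∉ ys := (List.nodup_cons.1 hxs).1
      simp only [combosInt]
      refine List.Nodup.append ?_ (ih hys (k + 1)) ?_
      · exact (ih hys k).map (fun a b h => by injection h)
      · intro c hc1 hc2
        simp only [List.mem_map] at hc1
        rcases hc1 with ⟨c', _, rfl⟩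
        exact hy (combosInt_subset hc2 y List.mem_cons_self)

theorem combosInt_nil_of_short {xs : List Int} {k : Nat} (h : xs.length < k) :
    combosInt xs k = [] := by
  induction xs generalizing k with
  | nil => cases k with | zero => omega | succ k => rfl
  | cons y ys ih =>
    cases k with
    | zero => omega
    | succ k =>
      simp only [combosInt]
      rw [ih (by simpa using h), ih (by simp at h ⊢; omega)]
      simp

-- "choose the first element" characterisation of combinations over an integer range
theorem combosInt_pyRange_succ (m : Int) (k : Nat) :
    ∀ (fuel : Nat) (start : Int), (m - start).toNat ≤ fuel →
    combosInt (PySem.List.pyRange start m 1) (k + 1) =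
      (PySem.List.pyRange start (m - k) 1).flatMap
        (fun i => (combosInt (PySem.List.pyRange (i + 1) m 1) k).map (i :: ·)) := by
  intro fuel
  induction fuel with
  | zero =>
    intro start h
    have hms : m ≤ start := by omega
    rw [PySem.List.pyRange_one_eq_nil hms, PySem.List.pyRange_one_eq_nil (by omega)]
    simp [combosInt]
  | succ fuel ih =>
    intro start h
    by_cases hlt : start < m - k
    · have hsm : start < m := by omega
      rw [PySem.List.pyRange_one_cons hsm, PySem.List.pyRange_one_cons hlt]
      simp only [combosInt, List.flatMap_cons]
      congr 1
      exact ih (start + 1) (by omega)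
    · -- range start (m-k) is empty; the combinations list is empty because the range is too short
      have h1 : PySem.List.pyRange start (m - (k : Int)) 1 = [] :=
        PySem.List.pyRange_one_eq_nil (by omega)
      rw [h1, combosInt_nil_of_short (by rw [PySem.List.length_pyRange_one]; omega)]
      simp

-- the per-monomer atom data
def perMono (mono2atom : List (Int × List Int)) (mol : List String) (i : Int) : List String :=
  (PySem.Dict.getD (PySem.Dict.mk mono2atom) i []).map (fun atom => PySem.List.pyGetD mol atom "")

def gatherData (mono2atom : List (Int × List Int)) (mol : List String) (c : List Int) : List String :=
  c.flatMap (perMono mono2atom mol)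

-- A's innermost loop: appending atoms one by one at a present key
theorem foldl_modify_append (mol : List String)
    (L : List Int) (k : List Int) :
    ∀ (d : PySem.Dict (List Int) (List String)) (v : List String),
    L.foldl (fun nmers atom => nmers.modify k [] (fun w => w ++ [PySem.List.pyGetD mol atom ""]))
        (d.insert k v)
      = d.insert k (v ++ L.map (fun atom => PySem.List.pyGetD mol atom "")) := by
  induction L with
  | nil => intro d v; simp
  | cons a L ih =>
    intro d v
    have hstep :
        (d.insert k v).modify k [] (fun w => w ++ [PySem.List.pyGetD mol a ""])
          = d.insert k (v ++ [PySem.List.pyGetD mol a ""]) := by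
      show (d.insert k v).insert k (((d.insert k v).getD k []) ++ [PySem.List.pyGetD mol a ""])
            = d.insert k (v ++ [PySem.List.pyGetD mol a ""])
      rw [PySem.Dict.getD_insert_self, PySem.Dict.insert_insert_self]
    simp only [List.foldl_cons, hstep, ih]
    simp

-- A's middle loop over the monomers of one combination
theorem foldl_monos (mono2atom : List (Int × List Int)) (mol : List String)
    (monos : List Int) (k : List Int) :
    ∀ (d : PySem.Dict (List Int) (List String)) (v : List String),
    monos.foldl
        (fun nmers mono =>
          (PySem.Dict.getD (PySem.Dict.mk mono2atom) mono []).foldl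
            (fun nmers atom => nmers.modify k [] (fun w => w ++ [PySem.List.pyGetD mol atom ""]))
            nmers)
        (d.insert k v)
      = d.insert k (v ++ gatherData mono2atom mol monos) := by
  induction monos with
  | nil => intro d v; simp [gatherData]
  | cons mono monos ih =>
    intro d v
    simp only [List.foldl_cons]
    rw [foldl_modify_append mol, ih]
    simp [gatherData, perMono]

-- A computes, for each combination, the gathered data, inserted at a fresh key
theorem make_nmers_eq_map (mono2atom : List (Int × List Int)) (mol : List String) (n : Int) :
    make_nmers mono2atom mol n =
      (combosInt (PySem.List.pyRange 0 (mono2atom.length : Int) 1) n.toNat).map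
        (fun c => (c, gatherData mono2atom mol c)) := by
  unfold make_nmers
  have hstep : (fun (nmers : PySem.Dict (List Int) (List String)) (nmer : List Int) =>
      let nmers' := nmers.insert nmer []
      nmer.foldl
        (fun nmers mono =>
          (PySem.Dict.getD (PySem.Dict.mk mono2atom) mono []).foldl
            (fun nmers atom => nmers.modify nmer [] (fun v => v ++ [PySem.List.pyGetD mol atom ""]))
            nmers)
        nmers')
      = fun nmers nmer => nmers.insert nmer (gatherData mono2atom mol nmer) := by
    funext d c
    show c.foldl _ (d.insert c []) = _
    rw [foldl_monos]
    simp
  rw [hstep]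
  show (List.foldl (fun nmers nmer => nmers.insert nmer (gatherData mono2atom mol nmer))
      PySem.Dict.empty
      (combosInt (PySem.List.pyRange 0 (mono2atom.length : Int) 1) n.toNat)).items = _
  have hfresh := PySem.Dict.items_foldl_insert_fresh
      (combosInt (PySem.List.pyRange 0 (mono2atom.length : Int) 1) n.toNat)
      (fun c => c) (fun c => gatherData mono2atom mol c) PySem.Dict.empty
      (fun a _ => PySem.Dict.contains_empty a)
      (by simpa using combosInt_nodup (PySem.List.nodup_pyRange_one 0 _) n.toNat)
  simp only [] at hfresh
  rw [hfresh]
  simp [PySem.Dict.empty]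

-- B's recursion computes the same combination/data pairs, in the same order
theorem make_nmers_alt_rec_eq (mono2atom : List (Int × List Int)) (mol : List String)
    (m : Int) (k : Nat) :
    ∀ (start : Int),
    make_nmers_alt_rec mono2atom mol m start k =
      (combosInt (PySem.List.pyRange start m 1) k).map
        (fun c => (c, gatherData mono2atom mol c)) := by
  induction k with
  | zero => intro start; simp [make_nmers_alt_rec, combosInt, gatherData]
  | succ k ih =>
    intro start
    show (PySem.List.pyRange start (m - k) 1).foldl
        (fun out i => out ++ (make_nmers_alt_rec mono2atom mol m (i + 1) k).map
          (fun td => (i :: td.1, perMono mono2atom mol i ++ td.2))) [] = _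
    rw [PySem.List.foldl_append_eq_flatMap
      (fun i => (make_nmers_alt_rec mono2atom mol m (i + 1) k).map
        (fun td => (i :: td.1, perMono mono2atom mol i ++ td.2)))]
    rw [combosInt_pyRange_succ m k (m - start).toNat start (le_refl _)]
    simp only [List.nil_append, List.map_flatMap]
    apply List.flatMap_congr  -- pointwise over the range
    intro i _
    rw [ih (i + 1)]
    simp only [List.map_map]
    apply List.map_congr_left
    intro c _
    simp [gatherData]

-- ===== VERDICT (by name: the statement is the Claim_ definition above) =====
theorem make_nmers_spec : Claim_equal_make_nmers := by
  intro mono2atom mol n _ _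
  show make_nmers mono2atom mol n = make_nmers_alt mono2atom mol n
  rw [make_nmers_eq_map]
  show _ = (PySem.Dict.ofList
      (make_nmers_alt_rec mono2atom mol (mono2atom.length : Int) 0 n.toNat)).items
  rw [make_nmers_alt_rec_eq]
  show _ = (List.foldl (fun d (p : List Int × List String) => d.insert p.1 p.2) PySem.Dict.empty
      ((combosInt (PySem.List.pyRange 0 (mono2atom.length : Int) 1) n.toNat).map
        (fun c => (c, gatherData mono2atom mol c)))).items
  rw [PySem.Dict.items_foldl_insert_fresh _ Prod.fst Prod.snd _
        (by intro a _; exact PySem.Dict.contains_empty a.1)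
        (by simp only [List.map_map]
            simpa [Function.comp_def] using
              combosInt_nodup (PySem.List.nodup_pyRange_one 0 (mono2atom.length : Int)) n.toNat)]
  simp [Function.comp_def, PySem.Dict.empty]
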